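-- pv_equiv track=rewrite | github.com/Karthik-Ragunath/competitive_programming | GridIndexSum.py | dynamicSolution
-- ===== SOURCE A (Python) =====
-- def dynamicSolution(maximumValue):
--     dp = [0] * (maximumValue + 1)
--     for i in range(1, maximumValue + 1, 1):
--         for j in range(1, i + 1, 1):
--             if i == j:
--                 dp[i] = dp[i] + (2 * i)
--             else:
--                 dp[i] = dp[i] + ((i + j) * 2)
--         dp[i] = dp[i] + dp[i - 1]
--     return dp
-- ===== SOURCE B (Python) =====
-- def dynamicSolution(maximumValue):
--     # Row i contributes sum_{j=1}^{i} (2*(i+j) if j<i else 2*i) = 3*i*i - i,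
--     # and dp[i] accumulates those contributions as a running prefix sum.
--     dp = [0] * (maximumValue + 1)
--     total = 0
--     for i in range(1, maximumValue + 1):
--         total += 3 * i * i - i
--         dp[i] = total
--     return dp
-- ===== Notes on version B (the rewrite author's own statement) =====
-- stated objective: faster
-- what changed: Replaces the quadratic nested loop with a per-row closed form 3*i*i - i accumulated by a running prefix sum in a single pass.
import Mathlib
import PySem

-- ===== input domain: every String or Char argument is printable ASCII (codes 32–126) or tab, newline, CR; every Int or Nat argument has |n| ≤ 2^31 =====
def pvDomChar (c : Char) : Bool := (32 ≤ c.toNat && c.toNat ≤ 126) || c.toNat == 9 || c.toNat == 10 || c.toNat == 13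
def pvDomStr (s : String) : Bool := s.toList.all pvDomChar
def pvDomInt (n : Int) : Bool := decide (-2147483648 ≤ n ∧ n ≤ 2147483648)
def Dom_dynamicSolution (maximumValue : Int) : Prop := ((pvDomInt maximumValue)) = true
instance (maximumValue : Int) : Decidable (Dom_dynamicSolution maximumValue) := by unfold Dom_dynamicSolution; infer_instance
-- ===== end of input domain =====

-- B replaces A's quadratic nested loop by a per-row closed form 3*i*i - i accumulated
-- with a running prefix sum (objective: faster, asymptotic).

-- ===== PORT A =====
def dynamicSolution (maximumValue : Int) : List Int :=
  let dp : List Int := List.replicate (maximumValue + 1).toNat 0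
  (PySem.List.pyRange 1 (maximumValue + 1) 1).foldl (fun dp i =>
    let dp :=
      (PySem.List.pyRange 1 (i + 1) 1).foldl (fun dp j =>
        if i = j then
          PySem.List.pySetD dp i (PySem.List.pyGetD dp i 0 + 2 * i)
        else
          PySem.List.pySetD dp i (PySem.List.pyGetD dp i 0 + (i + j) * 2)) dp
    PySem.List.pySetD dp i (PySem.List.pyGetD dp i 0 + PySem.List.pyGetD dp (i - 1) 0)) dp

-- ===== PORT B =====
def dynamicSolution_alt (maximumValue : Int) : List Int :=
  let dp : List Int := List.replicate (maximumValue + 1).toNat 0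
  ((PySem.List.pyRange 1 (maximumValue + 1) 1).foldl (fun (s : List Int × Int) i =>
      let total := s.2 + (3 * i * i - i)
      (PySem.List.pySetD s.1 i total, total)) (dp, 0)).1

-- ===== PRECONDITION & SPEC =====
def Spec_dynamicSolution (maximumValue : Int) (out : List Int) : Prop := out = dynamicSolution_alt maximumValue
instance (maximumValue : Int) (out : List Int) : Decidable (Spec_dynamicSolution maximumValue out) := by unfold Spec_dynamicSolution; infer_instance

-- ===== CLAIM (what is proved, stated in full; the proofs are below) =====
def Claim_equal_dynamicSolution : Prop := ∀ (maximumValue : Int), Dom_dynamicSolution maximumValue → Spec_dynamicSolution maximumValue (dynamicSolution maximumValue)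

-- ===== LEMMAS AND PROOFS =====

-- A's inner loop only ever writes index i: it adds the mapped contributions to dp[i].
theorem inner_foldl_eq (i : Int) (hi : 0 ≤ i) :
    ∀ (js : List Int) (dp : List Int),
      js.foldl (fun dp j =>
        if i = j then
          PySem.List.pySetD dp i (PySem.List.pyGetD dp i 0 + 2 * i)
        else
          PySem.List.pySetD dp i (PySem.List.pyGetD dp i 0 + (i + j) * 2)) dp
      = dp.set i.toNat (dp.getD i.toNat 0 +
          (js.map (fun j => if i = j then 2 * i else (i + j) * 2)).sum) := by
  intro js
  induction js with
  | nil =>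
    intro dp
    simp only [List.foldl_nil, List.map_nil, List.sum_nil, add_zero]
    by_cases h : i.toNat < dp.length
    · simp [List.getD, h]
    · rw [List.set_eq_of_length_le (by omega)]
  | cons j js ih =>
    intro dp
    simp only [List.foldl_cons, List.map_cons, List.sum_cons]
    by_cases hij : i = j
    · simp only [if_pos hij]
      rw [ih, PySem.List.pySetD_of_nonneg _ _ hi, PySem.List.pyGetD_of_nonneg _ _ hi]
      by_cases h : i.toNat < dp.length
      · rw [List.set_set]
        congr 1
        rw [List.getD, List.getElem?_set_self (by simpa using h)]
        simp
        ring
      · rw [List.set_eq_of_length_le (by simp; omega), List.set_eq_of_length_le (by omega),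
          List.set_eq_of_length_le (by omega)]
    · simp only [if_neg hij]
      rw [ih, PySem.List.pySetD_of_nonneg _ _ hi, PySem.List.pyGetD_of_nonneg _ _ hi]
      by_cases h : i.toNat < dp.length
      · rw [List.set_set]
        congr 1
        rw [List.getD, List.getElem?_set_self (by simpa using h)]
        simp
        ring
      · rw [List.set_eq_of_length_le (by simp; omega), List.set_eq_of_length_le (by omega),
          List.set_eq_of_length_le (by omega)]

-- Gauss-style sum for the linear contribution of the non-diagonal cells.
theorem sum_range_linear (c : Int) :
    ∀ n : Nat, ((List.range n).map (fun k : Nat => (c + (k : Int)) * 2)).sum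
      = 2 * c * n + n * (n - 1) := by
  intro n
  induction n with
  | zero => simp
  | succ n ih =>
    rw [List.range_succ, List.map_append, List.sum_append, ih]
    push_cast
    simp
    ring

-- Row i of A contributes exactly 3*i*i - i.
theorem contrib_eq (i : Int) (hi : 1 ≤ i) :
    ((PySem.List.pyRange 1 (i + 1) 1).map
        (fun j => if i = j then 2 * i else (i + j) * 2)).sum
      = 3 * i * i - i := by
  rw [PySem.List.pyRange_one_succ_right (by omega), List.map_append, List.sum_append]
  have hmap : (PySem.List.pyRange 1 i 1).map (fun j => if i = j then 2 * i else (i + j) * 2)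
      = (PySem.List.pyRange 1 i 1).map (fun j => (i + j) * 2) := by
    apply List.map_congr_left
    intro j hj
    rw [PySem.List.mem_pyRange_one] at hj
    rw [if_neg (by omega)]
  rw [hmap, PySem.List.pyRange_one, List.map_map]
  have h1 : ((List.range (i - 1).toNat).map
      ((fun j => (i + j) * 2) ∘ fun k : Nat => 1 + (k : Int))).sum
      = ((List.range (i - 1).toNat).map (fun k : Nat => ((i + 1) + (k : Int)) * 2)).sum := by
    apply congrArg
    apply List.map_congr_left
    intro k _
    simp [Function.comp]
    ring
  rw [h1, sum_range_linear (i + 1) (i - 1).toNat]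
  have h2 : ((i - 1).toNat : Int) = i - 1 := by omega
  rw [h2]
  simp
  ring

-- Outer loop: A's fold and B's fold agree, given B's running total equals dp[k-1]
-- and all cells from index k on are still zero.
theorem outer_eq :
    ∀ (n : Nat) (k : Int), 1 ≤ k →
      ∀ (dp : List Int) (t : Int),
        k + n ≤ (dp.length : Int) →
        PySem.List.pyGetD dp (k - 1) 0 = t →
        (∀ idx : Int, k ≤ idx → PySem.List.pyGetD dp idx 0 = 0) →
        (PySem.List.pyRange k (k + n) 1).foldl (fun dp i =>
            let dp :=
              (PySem.List.pyRange 1 (i + 1) 1).foldl (fun dp j =>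
                if i = j then
                  PySem.List.pySetD dp i (PySem.List.pyGetD dp i 0 + 2 * i)
                else
                  PySem.List.pySetD dp i (PySem.List.pyGetD dp i 0 + (i + j) * 2)) dp
            PySem.List.pySetD dp i (PySem.List.pyGetD dp i 0 + PySem.List.pyGetD dp (i - 1) 0)) dp
        = ((PySem.List.pyRange k (k + n) 1).foldl (fun (s : List Int × Int) i =>
            let total := s.2 + (3 * i * i - i)
            (PySem.List.pySetD s.1 i total, total)) (dp, t)).1 := by
  intro n
  induction n with
  | zero =>
    intro k hk dp t _ _ _
    rw [show k + (0 : Nat) = k by push_cast; ring, PySem.List.pyRange_one_eq_nil (le_refl k)]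
    simp
  | succ n ih =>
    intro k hk dp t hlen hprev hzero
    have hk0 : (0 : Int) ≤ k := by omega
    have hkn : k < k + ((n : Nat) + 1 : Nat) := by push_cast; omega
    rw [PySem.List.pyRange_one_cons hkn]
    simp only [List.foldl_cons]
    have hklt : k.toNat < dp.length := by omega
    -- evaluate A's step at i = k
    rw [inner_foldl_eq k hk0, contrib_eq k hk]
    have hgk : dp.getD k.toNat 0 = 0 := by
      have := hzero k (le_refl k)
      rwa [PySem.List.pyGetD_of_nonneg _ _ hk0] at this
    rw [hgk, zero_add]
    set C : Int := 3 * k * k - k with hC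
    -- the outer write of A's step
    rw [PySem.List.pySetD_of_nonneg _ _ hk0, PySem.List.pyGetD_of_nonneg _ _ hk0,
      PySem.List.pyGetD_of_nonneg _ _ (by omega : (0:Int) ≤ k - 1)]
    have hgset : (dp.set k.toNat C).getD k.toNat 0 = C := by simp [List.getD, hklt]
    have hne : (k - 1).toNat ≠ k.toNat := by omega
    have hgprev : (dp.set k.toNat C).getD (k - 1).toNat 0 = t := by
      rw [List.getD, List.getElem?_set_ne (by omega)]
      rw [PySem.List.pyGetD_of_nonneg _ _ (by omega : (0:Int) ≤ k - 1), List.getD] at hprev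
      exact hprev
    rw [hgset, hgprev, List.set_set]
    -- B's step at i = k
    rw [PySem.List.pySetD_of_nonneg _ _ hk0]
    -- align the remaining ranges and apply the induction hypothesis
    have hrange : k + ((n : Nat) + 1 : Nat) = (k + 1) + (n : Nat) := by push_cast; ring
    rw [hrange]
    have := ih (k + 1) (by omega) (dp.set k.toNat (t + C)) (t + C)
      (by rw [List.length_set]; push_cast at hlen ⊢; omega)
      (by
        rw [PySem.List.pyGetD_of_nonneg _ _ (by omega : (0:Int) ≤ k + 1 - 1), List.getD,
          show (k + 1 - 1).toNat = k.toNat by omega, List.getElem?_set_self hklt]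
        simp)
      (by
        intro idx hidx
        rw [PySem.List.pyGetD_of_nonneg _ _ (by omega : (0:Int) ≤ idx), List.getD,
          List.getElem?_set_ne (by omega)]
        have := hzero idx (by omega)
        rw [PySem.List.pyGetD_of_nonneg _ _ (by omega : (0:Int) ≤ idx), List.getD] at this
        exact this)
    rw [show C + t = t + C by ring]
    exact this

-- ===== VERDICT (by name: the statement is the Claim_ definition above) =====
theorem dynamicSolution_spec : Claim_equal_dynamicSolution := by
  intro m _
  unfold Spec_dynamicSolution dynamicSolution dynamicSolution_alt
  by_cases hm : 0 ≤ m
  · have hrange : m + 1 = 1 + (m.toNat : Int) := by omega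
    rw [hrange]
    exact outer_eq m.toNat 1 (le_refl 1) (List.replicate (1 + (m.toNat : Int)).toNat 0) 0
      (by rw [List.length_replicate]; omega)
      (by
        rw [PySem.List.pyGetD_of_nonneg _ _ (by omega), List.getD,
          List.getElem?_eq_getElem (by simp; omega)]
        simp)
      (by
        intro idx hidx
        rw [PySem.List.pyGetD_of_nonneg _ _ (by omega), List.getD]
        by_cases h : idx.toNat < (List.replicate (1 + (m.toNat : Int)).toNat (0:Int)).length
        · rw [List.getElem?_eq_getElem h]; simp
        · rw [List.getElem?_eq_none (by omega)]; simp)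
  · rw [PySem.List.pyRange_one_eq_nil (by omega)]
    simp
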